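-- pv_equiv track=rewrite | github.com/ckoons/BubbleSpacetimeTheory | play/toy_293_channel_contraction.py | fl_pass
-- ===== SOURCE A (Python) =====
-- def up(clauses, n, assign):
--     """Unit propagation. Returns (assignment_dict, contradiction_bool)."""
--     a = dict(assign)
--     changed = True
--     while changed:
--         changed = False
--         for cl in clauses:
--             unset = []
--             sat_flag = False
--             for lit in cl:
--                 v = abs(lit)
--                 if v in a:
--                     if (lit > 0) == a[v]:
--                         sat_flag = True
--                         break
--                 else:
--                     unset.append(lit)
--             if sat_flag:
--                 continue
--             if len(unset) == 0:
--                 return a, True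
--             if len(unset) == 1:
--                 lit = unset[0]
--                 v = abs(lit)
--                 if v not in a:
--                     a[v] = (lit > 0)
--                     changed = True
--     return a, False
--
-- def fl_pass(clauses, n, assign):
--     """One pass of failed literal over unset variables."""
--     a = dict(assign)
--     for y in range(1, n + 1):
--         if y in a:
--             continue
--         at, ct = up(clauses, n, {**a, y: True})
--         af, cf = up(clauses, n, {**a, y: False})
--         if ct and cf:
--             return a, True
--         elif ct:
--             a[y] = False
--             a, c = up(clauses, n, a)
--             if c:
--                 return a, True
--         elif cf:
--             a[y] = True
--             a, c = up(clauses, n, a)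
--             if c:
--                 return a, True
--         else:
--             for z in range(1, n + 1):
--                 if z not in a and z in at and z in af and at[z] == af[z]:
--                     a[z] = at[z]
--     return a, False
-- ===== SOURCE B (Python) =====
-- def build_occ(clauses):
--     """Occurrence lists (variable -> indices of clauses mentioning it); they do
--     not depend on the assignment, so the driver builds them once."""
--     occ = {}
--     for idx, cl in enumerate(clauses):
--         for lit in cl:
--             occ.setdefault(abs(lit), []).append(idx)
--     return occ
--
--
-- def up3(clauses, occ, assign):
--     """Counter-style unit propagation: per-clause (sat, remaining-literals)
--     states are kept incrementally through the occurrence lists, so assigning a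
--     variable touches only the clauses that mention it and the fixpoint
--     passes make O(1) decisions per clause instead of rescanning literals."""
--     a = dict(assign)
--     states = []
--     for cl in clauses:
--         sat = False
--         rem = []
--         for lit in cl:
--             v = abs(lit)
--             if v in a:
--                 if (lit > 0) == a[v]:
--                     sat = True
--             else:
--                 rem.append(lit)
--         states.append((sat, rem))
--
--     def assign_var(v, b):
--         a[v] = b
--         for idx in occ.get(v, []):
--             sat, rem = states[idx]
--             sat = sat or any(abs(l) == v and (l > 0) == b for l in rem)
--             rem = [l for l in rem if abs(l) != v]
--             states[idx] = (sat, rem)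
--
--     changed = True
--     while changed:
--         changed = False
--         for idx in range(len(states)):
--             sat, rem = states[idx]
--             if sat:
--                 continue
--             if not rem:
--                 return a, True
--             if len(rem) == 1:
--                 assign_var(abs(rem[0]), rem[0] > 0)
--                 changed = True
--     return a, False
--
--
-- def fl_pass(clauses, n, assign):
--     """One pass of failed literal over unset variables."""
--     a = dict(assign)
--     occ = build_occ(clauses)
--     for y in range(1, n + 1):
--         if y in a:
--             continue
--         at, ct = up3(clauses, occ, {**a, y: True})
--         af, cf = up3(clauses, occ, {**a, y: False})
--         if ct and cf:
--             return a, True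
--         if ct:
--             a = af   # up on (a, y=False) is exactly the second probe; cf is False here
--         elif cf:
--             a = at   # symmetrically, reuse the first probe
--         else:
--             for z in range(1, n + 1):
--                 if z not in a:
--                     vt = at.get(z)
--                     if vt is not None and af.get(z) == vt:
--                         a[z] = vt
--     return a, False
-- ===== Notes on version B (the rewrite author's own statement) =====
-- stated objective: alternative
-- what changed: Unit propagation is re-done as counter/occurrence-list propagation: occurrence lists (variable -> clause indices) are built once per call, per-clause (satisfied, remaining-literals) states are updated incrementally through them when a variable is assigned, so each fixpoint pass makes an O(1) decision per clause instead of rescanning every clause's literals; the driver also reuses the two probe propagations (a[y]=False/True followed by up is exactly the probe already computed), eliminating A's third propagation call per variable.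
import Mathlib
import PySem

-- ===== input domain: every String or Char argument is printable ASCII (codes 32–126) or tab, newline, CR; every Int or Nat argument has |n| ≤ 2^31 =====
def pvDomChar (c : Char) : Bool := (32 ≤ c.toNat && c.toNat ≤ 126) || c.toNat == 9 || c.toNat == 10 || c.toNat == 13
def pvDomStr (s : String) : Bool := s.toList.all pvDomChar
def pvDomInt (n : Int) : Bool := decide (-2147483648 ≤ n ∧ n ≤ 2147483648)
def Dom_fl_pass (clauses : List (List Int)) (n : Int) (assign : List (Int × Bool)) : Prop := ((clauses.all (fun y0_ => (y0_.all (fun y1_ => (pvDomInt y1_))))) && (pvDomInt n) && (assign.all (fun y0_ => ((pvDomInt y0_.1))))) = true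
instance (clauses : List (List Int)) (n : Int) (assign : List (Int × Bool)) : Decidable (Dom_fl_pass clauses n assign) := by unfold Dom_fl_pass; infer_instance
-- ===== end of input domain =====

-- B replaces A's unit propagation (full rescans of every clause's literals on every pass) by an
-- occurrence-list/counter propagation over per-clause (satisfied, remaining-literals) states kept
-- incrementally, and its driver reuses the two probe propagations instead of re-running one;
-- the return values are proved equal (same assignment, same insertion order, same flag).

-- ===== PORT A =====
-- inner 'for lit in cl' loop of up: returns (sat_flag, unset) with Python's early break
def upScanA (a : PySem.Dict Int Bool) : List Int → Bool × List Int
  | [] => (false, [])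
  | lit :: rest =>
    match a.get? |lit| with
    | some b => if decide (lit > 0) = b then (true, []) else upScanA a rest
    | none => let r := upScanA a rest; (r.1, lit :: r.2)

-- one 'for cl in clauses' pass of up: state (a, changed); third component = early 'return a, True'
def upPassA (a : PySem.Dict Int Bool) (changed : Bool) : List (List Int) → PySem.Dict Int Bool × Bool × Bool
  | [] => (a, changed, false)
  | cl :: rest =>
    let r := upScanA a cl
    if r.1 then upPassA a changed rest
    else
      match r.2 with
      | [] => (a, changed, true)
      | [lit] =>
        if a.contains |lit| then upPassA a changed rest
        else upPassA (a.insert |lit| (decide (lit > 0))) true rest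
      | _ :: _ :: _ => upPassA a changed rest

-- 'while changed' loop of up; fuel = total number of literals + 1 bounds the passes
-- (every pass except the last assigns a fresh variable occurring in the clauses)
def upFuelA : Nat → List (List Int) → PySem.Dict Int Bool → PySem.Dict Int Bool × Bool
  | 0, _, a => (a, false)
  | fuel + 1, clauses, a =>
    let r := upPassA a false clauses
    if r.2.2 then (r.1, true)
    else if r.2.1 then upFuelA fuel clauses r.1
    else (r.1, false)

def upA (clauses : List (List Int)) (a : PySem.Dict Int Bool) : PySem.Dict Int Bool × Bool :=
  upFuelA ((clauses.map List.length).sum + 1) clauses a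

-- 'for z in range(1, n+1)' body of fl_pass's else branch, counting z up lazily
def zLoopA (att aff : PySem.Dict Int Bool) : Nat → Int → PySem.Dict Int Bool → PySem.Dict Int Bool
  | 0, _, a => a
  | fuel + 1, z, a =>
    if ¬ a.contains z ∧ att.contains z ∧ aff.contains z ∧ att.getD z false = aff.getD z false
    then zLoopA att aff fuel (z + 1) (a.insert z (att.getD z false))
    else zLoopA att aff fuel (z + 1) a

-- 'for y in range(1, n+1)' loop of fl_pass, counting y up lazily
def flLoopA (clauses : List (List Int)) (n : Int) : Nat → Int → PySem.Dict Int Bool → PySem.Dict Int Bool × Bool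
  | 0, _, a => (a, false)
  | fuel + 1, y, a =>
    if a.contains y then flLoopA clauses n fuel (y + 1) a
    else
      let rt := upA clauses (a.insert y true)
      let rf := upA clauses (a.insert y false)
      if rt.2 && rf.2 then (a, true)
      else if rt.2 then
        let r := upA clauses (a.insert y false)
        if r.2 then (r.1, true) else flLoopA clauses n fuel (y + 1) r.1
      else if rf.2 then
        let r := upA clauses (a.insert y true)
        if r.2 then (r.1, true) else flLoopA clauses n fuel (y + 1) r.1
      else flLoopA clauses n fuel (y + 1) (zLoopA rt.1 rf.1 n.toNat 1 a)

def fl_pass (clauses : List (List Int)) (n : Int) (assign : List (Int × Bool)) : (List (Int × Bool)) × Bool :=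
  let a := PySem.Dict.ofList assign
  let r := flLoopA clauses n n.toNat 1 a
  (r.1.items, r.2)

-- ===== PORT B =====
-- occurrence lists: for idx, cl in enumerate(clauses): for lit in cl: occ.setdefault(abs(lit), []).append(idx)
def occB : List (List Int) → Nat → PySem.Dict Int (List Nat) → PySem.Dict Int (List Nat)
  | [], _, occ => occ
  | cl :: rest, idx, occ =>
    occB rest (idx + 1) (cl.foldl (fun o lit => o.modify |lit| [] (· ++ [idx])) occ)

-- initial per-clause state: one scan building (sat, rem)
def scanInitB (a : PySem.Dict Int Bool) : List Int → Bool → List Int → Bool × List Int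
  | [], sat, rem => (sat, rem)
  | lit :: rest, sat, rem =>
    match a.get? |lit| with
    | some bv => scanInitB a rest (sat || (decide (lit > 0) == bv)) rem
    | none => scanInitB a rest sat (rem ++ [lit])

-- body of assign_var applied to one clause state
def updStateB (v : Int) (b : Bool) (s : Bool × List Int) : Bool × List Int :=
  (s.1 || s.2.any (fun l => |l| == v && (decide (l > 0) == b)),
   s.2.filter (fun l => |l| != v))

-- assign_var: extend the assignment and touch only the clauses that mention v
def assignVarB (occ : PySem.Dict Int (List Nat)) (v : Int) (b : Bool)
    (a : PySem.Dict Int Bool) (st : List (Bool × List Int)) :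
    PySem.Dict Int Bool × List (Bool × List Int) :=
  (a.insert v b, (occ.getD v []).foldl (fun st idx => st.modify idx (updStateB v b)) st)

-- 'for idx in range(len(states))': O(1) decision per clause from its cached state
def upPassB (occ : PySem.Dict Int (List Nat)) :
    List Nat → PySem.Dict Int Bool → List (Bool × List Int) → Bool →
    PySem.Dict Int Bool × List (Bool × List Int) × Bool × Bool
  | [], a, st, ch => (a, st, ch, false)
  | idx :: rest, a, st, ch =>
    let s := st.getD idx (false, [])
    if s.1 then upPassB occ rest a st ch
    else
      match s.2 with
      | [] => (a, st, ch, true)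
      | [lit] =>
        let r := assignVarB occ |lit| (decide (lit > 0)) a st
        upPassB occ rest r.1 r.2 true
      | _ :: _ :: _ => upPassB occ rest a st ch

-- 'while changed' loop of up3; same fuel bound as A's port
def upLoopB (occ : PySem.Dict Int (List Nat)) :
    Nat → PySem.Dict Int Bool → List (Bool × List Int) → PySem.Dict Int Bool × Bool
  | 0, a, _ => (a, false)
  | fuel + 1, a, st =>
    let r := upPassB occ (List.range st.length) a st false
    if r.2.2.2 then (r.1, true)
    else if r.2.2.1 then upLoopB occ fuel r.1 r.2.1
    else (r.1, false)

def upB (clauses : List (List Int)) (occ : PySem.Dict Int (List Nat)) (a : PySem.Dict Int Bool) :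
    PySem.Dict Int Bool × Bool :=
  upLoopB occ ((clauses.map List.length).sum + 1) a
    (clauses.map (fun cl => scanInitB a cl false []))

-- B's z-loop: 'vt = at.get(z); if vt is not None and af.get(z) == vt: a[z] = vt'
def zLoopB (att aff : PySem.Dict Int Bool) : Nat → Int → PySem.Dict Int Bool → PySem.Dict Int Bool
  | 0, _, a => a
  | fuel + 1, z, a =>
    if a.contains z then zLoopB att aff fuel (z + 1) a
    else
      match att.get? z with
      | none => zLoopB att aff fuel (z + 1) a
      | some vt =>
        if aff.get? z == some vt then zLoopB att aff fuel (z + 1) (a.insert z vt)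
        else zLoopB att aff fuel (z + 1) a

-- driver: occurrence lists built once; two probes per variable, their results reused
def flLoopB (clauses : List (List Int)) (occ : PySem.Dict Int (List Nat)) (n : Int) :
    Nat → Int → PySem.Dict Int Bool → PySem.Dict Int Bool × Bool
  | 0, _, a => (a, false)
  | fuel + 1, y, a =>
    if a.contains y then flLoopB clauses occ n fuel (y + 1) a
    else
      let rt := upB clauses occ (a.insert y true)
      let rf := upB clauses occ (a.insert y false)
      if rt.2 && rf.2 then (a, true)
      else if rt.2 then flLoopB clauses occ n fuel (y + 1) rf.1
      else if rf.2 then flLoopB clauses occ n fuel (y + 1) rt.1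
      else flLoopB clauses occ n fuel (y + 1) (zLoopB rt.1 rf.1 n.toNat 1 a)

def fl_pass_alt (clauses : List (List Int)) (n : Int) (assign : List (Int × Bool)) : (List (Int × Bool)) × Bool :=
  let a := PySem.Dict.ofList assign
  let occ := occB clauses 0 PySem.Dict.empty
  let r := flLoopB clauses occ n n.toNat 1 a
  (r.1.items, r.2)

-- ===== PRECONDITION & SPEC =====
def Spec_fl_pass (clauses : List (List Int)) (n : Int) (assign : List (Int × Bool)) (out : (List (Int × Bool)) × Bool) : Prop := out = fl_pass_alt clauses n assign
instance (clauses : List (List Int)) (n : Int) (assign : List (Int × Bool)) (out : (List (Int × Bool)) × Bool) : Decidable (Spec_fl_pass clauses n assign out) := by unfold Spec_fl_pass; infer_instance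

-- ===== CLAIM (what is proved, stated in full; the proofs are below) =====
def Claim_equal_fl_pass : Prop := ∀ (clauses : List (List Int)) (n : Int) (assign : List (Int × Bool)), Dom_fl_pass clauses n assign → Spec_fl_pass clauses n assign (fl_pass clauses n assign)

-- ===== LEMMAS AND PROOFS =====

-- characterisations of a clause's status under an assignment
def satB (a : PySem.Dict Int Bool) (cl : List Int) : Bool :=
  cl.any fun lit => a.contains |lit| && (decide (lit > 0) == a.getD |lit| false)

def unsetB (a : PySem.Dict Int Bool) (cl : List Int) : List Int :=
  cl.filter fun lit => ! a.contains |lit|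

def stateOf (a : PySem.Dict Int Bool) (cl : List Int) : Bool × List Int :=
  (satB a cl, unsetB a cl)

-- A's early-break clause scan computes (satB, unsetB)
theorem scan_fst (a : PySem.Dict Int Bool) (cl : List Int) : (upScanA a cl).1 = satB a cl := by
  induction cl with
  | nil => simp [upScanA, satB]
  | cons lit rest ih =>
    simp only [satB, List.any_cons] at ih ⊢
    simp only [upScanA]
    cases hg : a.get? |lit| with
    | none =>
      have hc : a.contains |lit| = false := by
        rw [PySem.Dict.contains_eq_isSome_get?, hg]; rfl
      simp [hc, ih]
    | some b =>
      have hc : a.contains |lit| = true := by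
        rw [PySem.Dict.contains_eq_isSome_get?, hg]; rfl
      have hd : a.getD |lit| false = b := PySem.Dict.getD_of_get?_eq_some _ _ hg
      by_cases he : decide (lit > 0) = b
      · simp [hc, hd, he]
      · have hbe : (decide (lit > 0) == b) = false := by simp [he]
        simp [hc, hd, he, hbe, ih]

theorem scan_snd (a : PySem.Dict Int Bool) (cl : List Int) (h : satB a cl = false) :
    (upScanA a cl).2 = unsetB a cl := by
  induction cl with
  | nil => simp [upScanA, unsetB]
  | cons lit rest ih =>
    simp only [satB, List.any_cons, Bool.or_eq_false_iff] at h
    obtain ⟨h1, h2⟩ := h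
    simp only [upScanA, unsetB, List.filter_cons]
    cases hg : a.get? |lit| with
    | none =>
      have hc : a.contains |lit| = false := by
        rw [PySem.Dict.contains_eq_isSome_get?, hg]; rfl
      simp [hc]
      exact ih h2
    | some b =>
      have hc : a.contains |lit| = true := by
        rw [PySem.Dict.contains_eq_isSome_get?, hg]; rfl
      have hd : a.getD |lit| false = b := PySem.Dict.getD_of_get?_eq_some _ _ hg
      have he : decide (lit > 0) ≠ b := by
        intro hx; rw [hc, hd, ← hx] at h1; simp at h1
      simp [hc, he]
      exact ih h2

theorem unsetB_not_contains {a : PySem.Dict Int Bool} {cl : List Int} {lit : Int}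
    (h : lit ∈ unsetB a cl) : a.contains |lit| = false := by
  simp only [unsetB, List.mem_filter] at h
  simpa using h.2

-- B's initial clause scan computes the same state
theorem scanInitB_eq (a : PySem.Dict Int Bool) (cl : List Int) :
    ∀ sat rem, scanInitB a cl sat rem = (sat || satB a cl, rem ++ unsetB a cl) := by
  induction cl with
  | nil => intro sat rem; simp [scanInitB, satB, unsetB]
  | cons lit rest ih =>
    intro sat rem
    simp only [scanInitB, satB, unsetB, List.any_cons, List.filter_cons]
    cases hg : a.get? |lit| with
    | none =>
      have hc : a.contains |lit| = false := by
        rw [PySem.Dict.contains_eq_isSome_get?, hg]; rfl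
      simp only [ih, satB, unsetB, hc]
      simp
    | some bv =>
      have hc : a.contains |lit| = true := by
        rw [PySem.Dict.contains_eq_isSome_get?, hg]; rfl
      have hd : a.getD |lit| false = bv := PySem.Dict.getD_of_get?_eq_some _ _ hg
      simp only [ih, satB, unsetB, hc, hd]
      simp [Bool.or_assoc]

theorem statesB_eq (a : PySem.Dict Int Bool) (clauses : List (List Int)) :
    clauses.map (fun cl => scanInitB a cl false []) = clauses.map (stateOf a) := by
  apply List.map_congr_left
  intro cl _
  rw [scanInitB_eq]
  simp [stateOf]

-- effect of one fresh assignment on a clause's state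
theorem unsetB_insert {a : PySem.Dict Int Bool} {v : Int} (b : Bool) (cl : List Int)
    (hv : a.contains v = false) :
    unsetB (a.insert v b) cl = (unsetB a cl).filter (fun l => |l| != v) := by
  simp only [unsetB, List.filter_filter]
  apply List.filter_congr
  intro l _
  rw [PySem.Dict.contains_insert]
  by_cases h : |l| = v
  · subst h; simp [hv]
  · simp [bne]

theorem satB_insert {a : PySem.Dict Int Bool} {v : Int} (b : Bool) (cl : List Int)
    (hv : a.contains v = false) :
    satB (a.insert v b) cl
      = (satB a cl || (unsetB a cl).any (fun l => |l| == v && (decide (l > 0) == b))) := by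
  simp only [unsetB, List.any_filter]
  induction cl with
  | nil => simp [satB]
  | cons lit rest ih =>
    simp only [satB, List.any_cons] at ih ⊢
    rw [ih]
    by_cases hk : |lit| = v
    · have hc : a.contains |lit| = false := by rw [hk]; exact hv
      have hc' : (a.insert v b).contains |lit| = true := by
        rw [PySem.Dict.contains_insert]; simp [hk]
      have hd' : (a.insert v b).getD |lit| false = b := by
        rw [PySem.Dict.getD_insert]; simp [hk]
      have hkb : (|lit| == v) = true := by simp [hk]
      simp only [hc, hc', hd', hkb, Bool.true_and, Bool.false_and, Bool.not_false, Bool.false_or]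
      cases decide (lit > 0) == b <;> simp [Bool.or_comm]
    · have hc' : (a.insert v b).contains |lit| = a.contains |lit| := by
        rw [PySem.Dict.contains_insert]; simp [hk]
      have hd' : (a.insert v b).getD |lit| false = a.getD |lit| false := by
        rw [PySem.Dict.getD_insert]; simp [hk]
      have hkb : (|lit| == v) = false := by simp [hk]
      simp [hc', hd', hkb, Bool.or_assoc]

theorem stateOf_insert {a : PySem.Dict Int Bool} {v : Int} (b : Bool) (cl : List Int)
    (hv : a.contains v = false) :
    stateOf (a.insert v b) cl = updStateB v b (stateOf a cl) := by
  simp only [stateOf, updStateB, satB_insert b cl hv, unsetB_insert b cl hv]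

theorem updStateB_idem (v : Int) (b : Bool) (s : Bool × List Int) :
    updStateB v b (updStateB v b s) = updStateB v b s := by
  have h2 : (s.2.filter (fun l => |l| != v)).any (fun l => |l| == v && (decide (l > 0) == b)) = false := by
    rw [List.any_eq_false]
    intro x hx
    rw [List.mem_filter] at hx
    have hx2 : (|x| == v) = false := by simpa [bne] using hx.2
    simp [hx2]
  simp only [updStateB, List.filter_filter]
  rw [Prod.mk.injEq]
  exact ⟨by simp [h2], List.filter_congr (fun l _ => by simp [Bool.and_self])⟩

-- applying a state unchanged when the clause does not mention v
theorem updStateB_of_no_v {v : Int} (b : Bool) {a : PySem.Dict Int Bool} {cl : List Int}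
    (h : ∀ l ∈ cl, |l| ≠ v) : updStateB v b (stateOf a cl) = stateOf a cl := by
  simp only [updStateB, stateOf]
  rw [Prod.mk.injEq]
  constructor
  · have hany : (unsetB a cl).any (fun l => |l| == v && (decide (l > 0) == b)) = false := by
      rw [List.any_eq_false]
      intro x hx
      have hxcl : x ∈ cl := by simp only [unsetB, List.mem_filter] at hx; exact hx.1
      simp [h x hxcl]
    simp [hany]
  · apply List.filter_eq_self.mpr
    intro x hx
    have hxcl : x ∈ cl := by simp only [unsetB, List.mem_filter] at hx; exact hx.1
    simpa [bne] using h x hxcl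

-- a fold of List.modify at an idempotent function, read back pointwise
theorem foldl_modify_getElem? {σ : Type} (f : σ → σ) (hf : ∀ s, f (f s) = f s) :
    ∀ (js : List Nat) (st : List σ) (j : Nat),
      (js.foldl (fun st i => st.modify i f) st)[j]?
        = if j ∈ js then f <$> st[j]? else st[j]? := by
  intro js
  induction js with
  | nil => intro st j; simp
  | cons i rest ih =>
    intro st j
    simp only [List.foldl_cons, ih, List.getElem?_modify]
    by_cases hij : i = j <;> by_cases hm : j ∈ rest <;>
      cases h : st[j]? <;>
      simp [hij, hm, hf, List.mem_cons, eq_comm]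

-- completeness of the occurrence lists
def OccC (occ : PySem.Dict Int (List Nat)) (clauses : List (List Int)) : Prop :=
  ∀ (j : Nat) (hj : j < clauses.length), ∀ l ∈ clauses[j], j ∈ occ.getD |l| []

theorem occStep_getD (occ : PySem.Dict Int (List Nat)) (cl : List Int) (idx : Nat) (c : Int) :
    (cl.foldl (fun o lit => o.modify |lit| [] (· ++ [idx])) occ).getD c []
      = occ.getD c [] ++ ((cl.map (fun l => ((|l| : Int), idx))).filter (fun p => p.1 == c)).map (·.2) := by
  rw [show cl.foldl (fun o lit => o.modify |lit| [] (· ++ [idx])) occ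
        = (cl.map (fun l => ((|l| : Int), idx))).foldl (fun d p => d.modify p.1 [] (· ++ [p.2])) occ by
      rw [List.foldl_map]]
  exact PySem.Dict.getD_foldl_modify_append _ _ _

theorem occStep_mono {occ : PySem.Dict Int (List Nat)} {cl : List Int} {idx : Nat} {c : Int} {x : Nat}
    (h : x ∈ occ.getD c []) :
    x ∈ (cl.foldl (fun o lit => o.modify |lit| [] (· ++ [idx])) occ).getD c [] := by
  rw [occStep_getD]; exact List.mem_append_left _ h

theorem occStep_self {occ : PySem.Dict Int (List Nat)} {cl : List Int} {idx : Nat} {l : Int}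
    (h : l ∈ cl) :
    idx ∈ (cl.foldl (fun o lit => o.modify |lit| [] (· ++ [idx])) occ).getD |l| [] := by
  rw [occStep_getD]
  apply List.mem_append_right
  simp only [List.mem_map, List.mem_filter]
  exact ⟨(|l|, idx), ⟨⟨l, h, rfl⟩, by simp⟩, rfl⟩

theorem occB_mono : ∀ (cls : List (List Int)) (idx : Nat) (occ : PySem.Dict Int (List Nat))
    (c : Int) (x : Nat), x ∈ occ.getD c [] → x ∈ (occB cls idx occ).getD c [] := by
  intro cls
  induction cls with
  | nil => intro idx occ c x h; exact h
  | cons cl rest ih =>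
    intro idx occ c x h
    exact ih (idx + 1) _ c x (occStep_mono h)

theorem occB_complete : ∀ (cls : List (List Int)) (idx : Nat) (occ : PySem.Dict Int (List Nat))
    (j : Nat) (hj : j < cls.length), ∀ l ∈ cls[j], (idx + j) ∈ (occB cls idx occ).getD |l| [] := by
  intro cls
  induction cls with
  | nil => intro idx occ j hj; simp at hj
  | cons cl rest ih =>
    intro idx occ j hj l hl
    cases j with
    | zero =>
      simp only [List.getElem_cons_zero] at hl
      simpa using occB_mono rest (idx + 1) _ _ idx (occStep_self hl)
    | succ j =>
      simp only [List.getElem_cons_succ] at hl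
      have := ih (idx + 1) (cl.foldl (fun o lit => o.modify |lit| [] (· ++ [idx])) occ) j
        (by simpa using hj) l hl
      simpa [Nat.add_assoc, Nat.add_comm 1 j] using this

theorem occB_OccC (clauses : List (List Int)) : OccC (occB clauses 0 PySem.Dict.empty) clauses := by
  intro j hj l hl
  simpa using occB_complete clauses 0 PySem.Dict.empty j hj l hl

-- assign_var keeps the states in sync with the assignment
theorem assign_states {clauses : List (List Int)} {occ : PySem.Dict Int (List Nat)}
    (hocc : OccC occ clauses) (v : Int) (b : Bool) (a : PySem.Dict Int Bool)
    (hv : a.contains v = false) :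
    (occ.getD v []).foldl (fun st i => st.modify i (updStateB v b)) (clauses.map (stateOf a))
      = clauses.map (stateOf (a.insert v b)) := by
  apply List.ext_getElem?
  intro j
  rw [foldl_modify_getElem? _ (updStateB_idem v b)]
  by_cases hm : j ∈ occ.getD v []
  · simp only [hm, if_pos, List.getElem?_map]
    cases h : clauses[j]? with
    | none => rfl
    | some cl => simp [stateOf_insert b cl hv]
  · simp only [hm, List.getElem?_map]
    cases h : clauses[j]? with
    | none => rfl
    | some cl =>
      rw [List.getElem?_eq_some_iff] at h
      obtain ⟨hj, hcl⟩ := h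
      have hno : ∀ l ∈ cl, |l| ≠ v := by
        intro l hl hlv
        exact hm (hlv ▸ hocc j hj l (hcl ▸ hl))
      simp [stateOf_insert b cl hv, updStateB_of_no_v b hno]

-- one pass of A over the clause suffix = one pass of B over the index suffix
theorem pass_sim (clauses : List (List Int)) (occ : PySem.Dict Int (List Nat))
    (hocc : OccC occ clauses) :
    ∀ (m k : Nat), m = clauses.length - k → ∀ (a : PySem.Dict Int Bool) (ch : Bool),
      upPassB occ (List.range' k m) a (clauses.map (stateOf a)) ch
        = ((upPassA a ch (clauses.drop k)).1,
           clauses.map (stateOf (upPassA a ch (clauses.drop k)).1),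
           (upPassA a ch (clauses.drop k)).2.1,
           (upPassA a ch (clauses.drop k)).2.2) := by
  intro m
  induction m with
  | zero =>
    intro k hm a ch
    have hk : clauses.length ≤ k := by omega
    rw [List.drop_eq_nil_of_le hk]
    simp [upPassB, upPassA, List.range']
  | succ m ih =>
    intro k hm a ch
    have hk : k < clauses.length := by omega
    rw [List.range'_succ, List.drop_eq_getElem_cons hk]
    have hget : (clauses.map (stateOf a)).getD k (false, []) = stateOf a clauses[k] := by
      rw [List.getD_eq_getElem?_getD, List.getElem?_map,
        List.getElem?_eq_getElem hk]
      rfl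
    simp only [upPassB, upPassA, hget]
    rw [scan_fst]
    cases hsat : satB a clauses[k] with
    | true =>
      simp only [stateOf, hsat, if_pos]
      exact ih (k + 1) (by omega) a ch
    | false =>
      rw [scan_snd a clauses[k] hsat]
      simp only [stateOf, hsat, Bool.false_eq_true, if_false]
      cases hu : unsetB a clauses[k] with
      | nil => simp
      | cons lit tail =>
        cases tail with
        | nil =>
          have hmem : lit ∈ unsetB a clauses[k] := by rw [hu]; exact List.mem_cons_self ..
          have hc : a.contains |lit| = false := unsetB_not_contains hmem
          simp only [hc, Bool.false_eq_true, if_false, assignVarB]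
          rw [assign_states hocc |lit| (decide (lit > 0)) a hc]
          exact ih (k + 1) (by omega) _ true
        | cons l2 t2 =>
          exact ih (k + 1) (by omega) a ch
  
-- the fixpoint loops agree
theorem loop_sim (clauses : List (List Int)) (occ : PySem.Dict Int (List Nat))
    (hocc : OccC occ clauses) :
    ∀ (fuel : Nat) (a : PySem.Dict Int Bool),
      upLoopB occ fuel a (clauses.map (stateOf a)) = upFuelA fuel clauses a := by
  intro fuel
  induction fuel with
  | zero => intro a; rfl
  | succ fuel ih =>
    intro a
    have hlen : (clauses.map (stateOf a)).length = clauses.length := List.length_map ..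
    have hpass := pass_sim clauses occ hocc clauses.length 0 (by omega) a false
    simp only [List.drop_zero] at hpass
    simp only [upLoopB, upFuelA, hlen, List.range_eq_range', hpass]
    cases hcf : (upPassA a false clauses).2.2 with
    | true => simp
    | false =>
      cases hch : (upPassA a false clauses).2.1 with
      | true => simp [ih]
      | false => simp

theorem up_eq (clauses : List (List Int)) (a : PySem.Dict Int Bool) :
    upB clauses (occB clauses 0 PySem.Dict.empty) a = upA clauses a := by
  unfold upB upA
  rw [statesB_eq]
  exact loop_sim clauses _ (occB_OccC clauses) _ a

theorem zLoop_eq (att aff : PySem.Dict Int Bool) :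
    ∀ (fuel : Nat) (z : Int) (a : PySem.Dict Int Bool),
      zLoopA att aff fuel z a = zLoopB att aff fuel z a := by
  intro fuel
  induction fuel with
  | zero => intro z a; rfl
  | succ fuel ih =>
    intro z a
    simp only [zLoopA, zLoopB]
    by_cases hc : a.contains z
    · simp [hc, ih]
    · simp only [hc, Bool.false_eq_true, if_false]
      cases hg : att.get? z with
      | none =>
        have hct : att.contains z = false := by
          rw [PySem.Dict.contains_eq_isSome_get?, hg]; rfl
        simp [hct, ih]
      | some vt =>
        have hct : att.contains z = true := by
          rw [PySem.Dict.contains_eq_isSome_get?, hg]; rfl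
        have hdt : att.getD z false = vt := PySem.Dict.getD_of_get?_eq_some _ _ hg
        cases hf : aff.get? z with
        | none =>
          have hcf : aff.contains z = false := by
            rw [PySem.Dict.contains_eq_isSome_get?, hf]; rfl
          simp [hct, hcf, ih]
        | some vf =>
          have hcf : aff.contains z = true := by
            rw [PySem.Dict.contains_eq_isSome_get?, hf]; rfl
          have hdf : aff.getD z false = vf := PySem.Dict.getD_of_get?_eq_some _ _ hf
          by_cases hv : vt = vf
          · simp [hct, hcf, hdt, hdf, hv, ih]
          · simp [hct, hcf, hdt, hdf, hv, Ne.symm hv, ih]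

theorem flLoop_eq (clauses : List (List Int)) (n : Int) :
    ∀ (fuel : Nat) (y : Int) (a : PySem.Dict Int Bool),
      flLoopA clauses n fuel y a = flLoopB clauses (occB clauses 0 PySem.Dict.empty) n fuel y a := by
  intro fuel
  induction fuel with
  | zero => intro y a; rfl
  | succ fuel ih =>
    intro y a
    simp only [flLoopA, flLoopB, ← up_eq]
    by_cases hc : a.contains y
    · simp [hc, ih]
    · simp only [hc, Bool.false_eq_true, if_false]
      cases ht : (upB clauses (occB clauses 0 PySem.Dict.empty) (a.insert y true)).2 with
      | true =>
        cases hf : (upB clauses (occB clauses 0 PySem.Dict.empty) (a.insert y false)).2 with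
        | true => simp
        | false => simp [ih]
      | false =>
        cases hf : (upB clauses (occB clauses 0 PySem.Dict.empty) (a.insert y false)).2 with
        | true => simp [ih]
        | false => simp [ih, zLoop_eq]

-- ===== VERDICT (by name: the statement is the Claim_ definition above) =====
theorem fl_pass_spec : Claim_equal_fl_pass := by
  intro clauses n assign _
  unfold Spec_fl_pass fl_pass fl_pass_alt
  simp only [flLoop_eq]
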